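-- pv_equiv track=rewrite | github.com/yunjinchoidev/problemSolving | 2023/January/프로그래머스/디펜스 게임.py | solution
-- ===== SOURCE A (Python) =====
-- import heapq
--
-- def solution(n, k, enemy):
--     answer = 0
--     h = []
--     heapq.heapify(h)
--     i = 0
--     while True:
--         if i >= len(enemy):
--             break
--         if n - enemy[i] > 0:
--             n -= enemy[i]
--             heapq.heappush(h, -1 * enemy[i])
--             answer += 1
--             i += 1
--         else:
--             if k > 0:
--                 k -= 1
--                 n -= enemy[i]
--                 heapq.heappush(h, -1 * enemy[i])
--                 n += -1 * heapq.heappop(h)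
--                 i += 1
--                 answer += 1
--                 if i == len(enemy):
--                     break
--                 continue
--             else:
--                 break
--     return answer
-- ===== SOURCE B (Python) =====
-- import heapq
--
-- def solution(n, k, enemy):
--     answer = 0
--     total = 0
--     imm = []
--     imm_sum = 0
--     for e in enemy:
--         total += e
--         heapq.heappush(imm, e)
--         imm_sum += e
--         if len(imm) > k:
--             imm_sum -= heapq.heappop(imm)
--         if total - imm_sum < n:
--             answer += 1
--         else:
--             break
--     return answer
-- ===== Notes on version B (the rewrite author's own statement) =====
-- stated objective: alternative
-- what changed: Replaces A's lazy greedy (spend HP, and on shortfall refund the largest enemy so far from a max-heap of all enemies seen) by a single pass keeping a running prefix sum plus a size-capped min-heap of the k largest enemies seen, counting prefixes while prefix_sum - heap_sum < n; the heap holds at most k elements instead of all of them.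
-- outside the precondition, e.g. on solution(-9, 2, [7]): A returns 1, B returns 0; on solution(5, 3, [5, 3, 7, 1, 1, -6, 12]): A returns 6, B returns 7
import Mathlib
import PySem

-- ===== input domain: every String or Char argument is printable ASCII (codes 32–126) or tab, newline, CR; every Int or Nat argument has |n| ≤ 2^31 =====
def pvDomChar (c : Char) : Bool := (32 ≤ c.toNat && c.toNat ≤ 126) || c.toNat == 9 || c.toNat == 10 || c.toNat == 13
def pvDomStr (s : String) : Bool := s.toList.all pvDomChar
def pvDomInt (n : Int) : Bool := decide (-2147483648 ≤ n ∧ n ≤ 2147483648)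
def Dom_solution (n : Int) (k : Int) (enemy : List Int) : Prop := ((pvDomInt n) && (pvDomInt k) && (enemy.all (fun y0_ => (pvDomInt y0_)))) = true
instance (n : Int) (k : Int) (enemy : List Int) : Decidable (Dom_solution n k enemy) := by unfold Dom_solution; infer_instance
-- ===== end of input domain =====

-- B replaces A's lazy greedy (max-heap of ALL enemies seen, refund the largest on shortfall)
-- by a prefix-sum pass with a min-heap capped at k elements (the k largest seen); same value
-- on the stated domain (positive HP, non-negative enemies), proved below.

-- ===== PORT A =====
-- Python's heapq is modelled by its value semantics: the heap list is a bag of ints,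
-- heappush adds a value, heappop removes and returns the SMALLEST value.  This is exact
-- here: only pushed values and popped minima are observable in either program (for equal
-- ints Python's heappop is value-identical), the heap's internal layout never escapes.
def heapPush (h : List Int) (v : Int) : List Int := h ++ [v]

def heapPop (h : List Int) : Option (Int × List Int) :=
  match h.min? with
  | none => none            -- heappop on an empty heap raises; never reached in these ports
  | some m => some (m, h.erase m)

def solutionGo (n : Int) (k : Int) (h : List Int) (answer : Int) : List Int → Int
  | [] => answer
  | e :: rest =>
    if n - e > 0 then
      solutionGo (n - e) k (heapPush h (-1 * e)) (answer + 1) rest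
    else
      if k > 0 then
        match heapPop (heapPush h (-1 * e)) with
        | none => answer     -- unreachable: the heap was just pushed to
        | some (m, h2) => solutionGo (n - e + -1 * m) (k - 1) h2 (answer + 1) rest
      else answer

def solution (n : Int) (k : Int) (enemy : List Int) : Int :=
  solutionGo n k [] 0 enemy

-- ===== PORT B =====
def solutionAltGo (n0 : Int) (k0 : Int) (total : Int) (imm : List Int) (immSum : Int) (answer : Int) : List Int → Int
  | [] => answer
  | e :: rest =>
    if ((heapPush imm e).length : Int) > k0 then
      match heapPop (heapPush imm e) with
      | none => answer       -- unreachable: the heap was just pushed to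
      | some (mv, imm2) =>
        if (total + e) - (immSum + e - mv) < n0 then
          solutionAltGo n0 k0 (total + e) imm2 (immSum + e - mv) (answer + 1) rest
        else answer
    else
      if (total + e) - (immSum + e) < n0 then
        solutionAltGo n0 k0 (total + e) (heapPush imm e) (immSum + e) (answer + 1) rest
      else answer

def solution_alt (n : Int) (k : Int) (enemy : List Int) : Int :=
  solutionAltGo n k 0 [] 0 0 enemy

-- ===== PRECONDITION & SPEC =====
-- Pre_ covers the problem's natural domain (positive HP, non-negative enemy damage) and,
-- in addition, every input with k ≤ 0 (no immunities: there the heap logic of both is dead)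
-- and every input with 0 < n and enemy.length ≤ k (an immunity for every wave: both survive
-- all of them), where the two programs agree for arbitrary enemy values.  Excluded is only
-- 0 < k < enough with healing (negative) enemies or non-positive HP:
-- there the two greedy strategies legitimately diverge and A's values are accidents of its
-- lazy refund order (e.g. it counts waves survived at HP ≤ 0).
def Pre_solution (n : Int) (k : Int) (enemy : List Int) : Prop :=
  (0 < n ∧ ∀ e ∈ enemy, 0 ≤ e) ∨ k ≤ 0 ∨ (0 < n ∧ (enemy.length : Int) ≤ k)
instance (n : Int) (k : Int) (enemy : List Int) : Decidable (Pre_solution n k enemy) := by unfold Pre_solution; infer_instance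

def pvWitness_solution : Int × Int × List Int := (10, 2, [4, 5, 7, 2])

def Spec_solution (n : Int) (k : Int) (enemy : List Int) (out : Int) : Prop := out = solution_alt n k enemy
instance (n : Int) (k : Int) (enemy : List Int) (out : Int) : Decidable (Spec_solution n k enemy out) := by unfold Spec_solution; infer_instance

-- ===== CLAIM (what is proved, stated in full; the proofs are below) =====
def Claim_equal_solution : Prop := ∀ (n : Int) (k : Int) (enemy : List Int), Dom_solution n k enemy → Pre_solution n k enemy → Spec_solution n k enemy (solution n k enemy)

-- ===== LEMMAS AND PROOFS =====

-- The multiset of enemy values held in A's (negated) heap.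
def negM (h : List Int) : Multiset Int := (↑h : Multiset Int).map (fun x => -x)

theorem negM_nil : negM [] = 0 := rfl

theorem negM_push (h : List Int) (e : Int) : negM (heapPush h (-1 * e)) = e ::ₘ negM h := by
  simp [negM, heapPush, ← Multiset.coe_add]
  rw [add_comm, Multiset.singleton_add, Multiset.cons_coe]

theorem mem_negM {h : List Int} {x : Int} : x ∈ negM h ↔ -x ∈ h := by
  constructor
  · rintro hx
    rcases Multiset.mem_map.mp hx with ⟨a, ha, rfl⟩
    simpa using ha
  · intro hx
    exact Multiset.mem_map.mpr ⟨-x, by simpa using hx, by ring⟩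

theorem negM_erase (h : List Int) (a : Int) :
    negM (h.erase a) = (negM h).erase (-a) := by
  simp [negM, ← Multiset.coe_erase]
  exact (Multiset.map_erase _ (fun x y hxy => by omega) a ↑h)

-- split a sub-bag of a sum into parts below each summand
theorem msplit {s a b : Multiset Int} (h : s ≤ a + b) :
    ∃ sa sb, s = sa + sb ∧ sa ≤ a ∧ sb ≤ b := by
  refine ⟨s ∩ a, s - a, ?_, Multiset.inter_le_right, Multiset.sub_le_iff_le_add'.mpr h⟩
  ext x
  simp [Multiset.count_sub, Multiset.count_inter]
  omega

-- a sub-bag of any prescribed smaller size exists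
theorem msub_card {t : Multiset Int} {n : ℕ} (hn : n ≤ t.card) :
    ∃ u, u ≤ t ∧ u.card = n := by
  refine ⟨↑(t.toList.take n), ?_, ?_⟩
  · calc (↑(t.toList.take n) : Multiset Int) ≤ ↑t.toList := (List.take_sublist n t.toList).subperm
    _ = t := Multiset.coe_toList t
  · simp
    omega

-- bags of equal size, every element of the first ≤ every element of the second
theorem pair_sum_le : ∀ (s t : Multiset Int), s.card = t.card →
    (∀ a ∈ s, ∀ b ∈ t, a ≤ b) → s.sum ≤ t.sum := by
  intro s
  induction s using Multiset.induction with
  | empty =>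
    intro t hc _
    have : t = 0 := Multiset.card_eq_zero.mp (by simpa using hc.symm)
    simp [this]
  | cons a s ih =>
    intro t hc hle
    have ht : t ≠ 0 := by
      intro h0; rw [h0] at hc; simp at hc
    obtain ⟨b, hb⟩ := Multiset.exists_mem_of_ne_zero ht
    have hbt := Multiset.cons_erase hb
    have hc' : s.card = (t.erase b).card := by
      have h2 : s.card + 1 = t.card := by simpa using hc
      have h3 : (t.erase b).card = t.card - 1 := by
        rw [Multiset.card_erase_of_mem hb, Nat.pred_eq_sub_one]
      omega
    have hrec := ih (t.erase b) hc' (fun x hx y hy =>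
      hle x (Multiset.mem_cons_of_mem hx) y (Multiset.mem_of_le (Multiset.erase_le b t) hy))
    have hab : a ≤ b := hle a (Multiset.mem_cons_self a s) b hb
    have : (a ::ₘ s).sum = a + s.sum := by simp
    have h2 : t.sum = b + (t.erase b).sum := by rw [← hbt]; simp
    rw [this, h2]
    linarith

-- any sub-bag of X + O, no bigger than X, with O pointwise below X and X non-negative,
-- sums to at most X
theorem exch_le {S X O : Multiset Int} (hs : S ≤ X + O)
    (hord : ∀ x ∈ X, ∀ y ∈ O, y ≤ x) (hc : S.card ≤ X.card)
    (hx : ∀ x ∈ X, 0 ≤ x) : S.sum ≤ X.sum := by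
  obtain ⟨SA, SB, rfl, hSA, hSB⟩ := msplit hs
  obtain ⟨T, hT⟩ := Multiset.le_iff_exists_add.mp hSA
  have hcard : SB.card ≤ T.card := by
    have h1 := congrArg Multiset.card hT
    simp at h1 hc
    omega
  obtain ⟨U, hUT, hUc⟩ := msub_card hcard
  have hUX : ∀ b ∈ U, b ∈ X := fun b hb => by
    rw [hT]; exact Multiset.mem_add.mpr (Or.inr (Multiset.mem_of_le hUT hb))
  have h1 : SB.sum ≤ U.sum :=
    pair_sum_le SB U hUc.symm
      (fun a ha b hb => hord b (hUX b hb) a (Multiset.mem_of_le hSB ha))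
  obtain ⟨V, hV⟩ := Multiset.le_iff_exists_add.mp hUT
  have h2 : 0 ≤ V.sum := Multiset.sum_nonneg (fun x hxV => by
    refine hx x ?_
    rw [hT]
    exact Multiset.mem_add.mpr (Or.inr (by rw [hV]; exact Multiset.mem_add.mpr (Or.inr hxV))))
  have hXsum : X.sum = SA.sum + U.sum + V.sum := by rw [hT, hV]; simp [Multiset.sum_add]; ring
  simp only [Multiset.sum_add]
  linarith

-- the break-case bound: a bag of size |R| inside (e ::ₘ R) + H, with H pointwise below R,
-- everything in R (and e) at least c, sums to at most R.sum + e - c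
theorem lemB {S R H : Multiset Int} {e c : Int} (hs : S ≤ (e ::ₘ R) + H)
    (hc : S.card = R.card) (hord : ∀ y ∈ H, ∀ r ∈ R, y ≤ r)
    (hr : ∀ r ∈ R, c ≤ r) (he : c ≤ e) : S.sum ≤ R.sum + e - c := by
  obtain ⟨SA, SB, rfl, hSA, hSB⟩ := msplit hs
  obtain ⟨M, hM⟩ := Multiset.le_iff_exists_add.mp hSA
  have hMc : M.card = SB.card + 1 := by
    have h1 := congrArg Multiset.card hM
    have h2 : (SA + SB).card = R.card := hc
    simp at h1 h2
    omega
  have hMle : M ≤ {e} + R := by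
    rw [Multiset.singleton_add]
    rw [hM]
    exact Multiset.le_add_left M SA
  obtain ⟨Me, MR, hMsplit, hMe, hMR⟩ := msplit hMle
  have hsum : e + R.sum = SA.sum + M.sum := by
    have := congrArg Multiset.sum hM
    simpa using this
  rcases Multiset.le_singleton.mp hMe with h0 | h1
  · -- M entirely inside R; it has |SB| + 1 elements, pair SB with |SB| of them
    have hMR' : M ≤ R := by rw [hMsplit, h0]; simpa using hMR
    have hcard' : SB.card ≤ M.card := by omega
    obtain ⟨U, hUM, hUc⟩ := msub_card hcard'
    obtain ⟨W, hW⟩ := Multiset.le_iff_exists_add.mp hUM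
    have hWc : W.card = 1 := by
      have := congrArg Multiset.card hW
      simp at this
      omega
    obtain ⟨w, hw⟩ := Multiset.card_eq_one.mp hWc
    have hwR : w ∈ R := Multiset.mem_of_le hMR'
      (by rw [hW, hw]; exact Multiset.mem_add.mpr (Or.inr (Multiset.mem_singleton_self w)))
    have h1 : SB.sum ≤ U.sum :=
      pair_sum_le SB U hUc.symm (fun a ha b hb =>
        hord a (Multiset.mem_of_le hSB ha) b
          (Multiset.mem_of_le hMR' (Multiset.mem_of_le hUM hb)))
    have hMsum : M.sum = U.sum + w := by rw [hW, hw]; simp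
    have hcw : c ≤ w := hr w hwR
    simp only [Multiset.sum_add]
    linarith
  · -- M = e ::ₘ MR with |MR| = |SB|
    have hMsum : M.sum = e + MR.sum := by rw [hMsplit, h1]; simp
    have hMRc : MR.card = SB.card := by
      have := congrArg Multiset.card hMsplit
      rw [h1] at this
      simp at this
      omega
    have h2 : SB.sum ≤ MR.sum :=
      pair_sum_le SB MR hMRc.symm (fun a ha b hb =>
        hord a (Multiset.mem_of_le hSB ha) b (Multiset.mem_of_le hMR hb))
    simp only [Multiset.sum_add]
    linarith

-- the capped-heap slide step keeps the "top bag" characterisation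
theorem slide {imm out : Multiset Int} {e mu : Int}
    (hord : ∀ x ∈ imm, ∀ y ∈ out, y ≤ x)
    (hmem : mu ∈ e ::ₘ imm) (hmin : ∀ b ∈ e ::ₘ imm, mu ≤ b) :
    (e ::ₘ imm).erase mu + (mu ::ₘ out) = (e ::ₘ imm) + out ∧
    (∀ x ∈ (e ::ₘ imm).erase mu, ∀ y ∈ mu ::ₘ out, y ≤ x) := by
  constructor
  · have h1 := Multiset.cons_erase hmem
    calc (e ::ₘ imm).erase mu + (mu ::ₘ out)
        = mu ::ₘ ((e ::ₘ imm).erase mu + out) := by rw [Multiset.add_cons]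
      _ = (mu ::ₘ (e ::ₘ imm).erase mu) + out := by rw [Multiset.cons_add]
      _ = (e ::ₘ imm) + out := by rw [h1]
  · intro x hx y hy
    have hx' : x ∈ e ::ₘ imm := Multiset.mem_of_le (Multiset.erase_le mu (e ::ₘ imm)) hx
    rcases Multiset.mem_cons.mp hy with rfl | hyo
    · exact hmin x hx'
    · rcases Multiset.mem_cons.mp hx' with rfl | hxi
      · -- x = e survived the erase
        by_cases hei : x ∈ imm
        · exact hord x hei y hyo
        · have hmue : mu ≠ x := by
            intro hh
            rw [hh] at hx
            rw [Multiset.erase_cons_head] at hx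
            exact hei hx
          have hmui : mu ∈ imm := by
            rcases Multiset.mem_cons.mp hmem with h | h
            · exact absurd h hmue
            · exact h
          exact le_trans (hord mu hmui y hyo) (hmin x (Multiset.mem_cons_self x imm))
      · exact hord x hxi y hyo

-- one step of B, abstracted: it produces a new heap bag imm' and outside bag out' with
-- the same invariant shape, and branches on (total + e) - imm'.sum < n0
theorem altGo_step (n0 k0 total ans e : Int) (rest imm : List Int) (out : Multiset Int)
    (hord : ∀ x ∈ (↑imm : Multiset Int), ∀ y ∈ out, y ≤ x)
    (hlen : (imm.length : Int) = min (max k0 0) ((imm.length : Int) + out.card)) :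
    ∃ (imm' : List Int) (out' : Multiset Int),
      solutionAltGo n0 k0 total imm ((↑imm : Multiset Int).sum) ans (e :: rest)
        = (if (total + e) - ((↑imm' : Multiset Int).sum) < n0
           then solutionAltGo n0 k0 (total + e) imm' ((↑imm' : Multiset Int).sum) (ans + 1) rest
           else ans)
      ∧ (↑imm' : Multiset Int) + out' = (↑imm : Multiset Int) + (e ::ₘ out)
      ∧ (∀ x ∈ (↑imm' : Multiset Int), ∀ y ∈ out', y ≤ x)
      ∧ ((imm'.length : Int) = min (max k0 0) ((imm.length : Int) + out.card + 1)) := by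
  have hco : (↑(heapPush imm e) : Multiset Int) = e ::ₘ (↑imm : Multiset Int) := by
    simp [heapPush, ← Multiset.coe_add]
    rw [add_comm, Multiset.singleton_add, Multiset.cons_coe]
  by_cases hpop : ((heapPush imm e).length : Int) > k0
  · -- over capacity: pop the minimum
    obtain ⟨mu, hmu⟩ : ∃ mu, (heapPush imm e).min? = some mu := by
      cases hm : (heapPush imm e).min? with
      | none =>
        have : heapPush imm e = [] := List.min?_eq_none_iff.mp hm
        simp [heapPush] at this
      | some m => exact ⟨m, rfl⟩
    have hspec : mu ∈ heapPush imm e ∧ ∀ b ∈ heapPush imm e, mu ≤ b := by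
      rw [List.min?_eq_some_iff] at hmu; exact hmu
    have hmemM : mu ∈ e ::ₘ (↑imm : Multiset Int) := by
      rw [← hco]; exact Multiset.mem_coe.mpr hspec.1
    have hminM : ∀ b ∈ e ::ₘ (↑imm : Multiset Int), mu ≤ b := by
      intro b hb
      rw [← hco] at hb
      exact hspec.2 b (Multiset.mem_coe.mp hb)
    obtain ⟨hsp, hor⟩ := slide hord hmemM hminM
    have hcoe : (↑((heapPush imm e).erase mu) : Multiset Int)
        = (e ::ₘ (↑imm : Multiset Int)).erase mu := by
      rw [← Multiset.coe_erase, hco]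
    have hS : (↑((heapPush imm e).erase mu) : Multiset Int).sum
        = (↑imm : Multiset Int).sum + e - mu := by
      have h1 := congrArg Multiset.sum (Multiset.cons_erase hmemM)
      rw [Multiset.sum_cons, Multiset.sum_cons] at h1
      rw [hcoe]
      linarith
    refine ⟨(heapPush imm e).erase mu, mu ::ₘ out, ?_, ?_, ?_, ?_⟩
    · simp only [solutionAltGo]
      rw [if_pos hpop]
      simp only [heapPop, hmu]
      rw [hS]
    · rw [hcoe, hsp]
      rw [Multiset.cons_add, Multiset.add_cons]
    · intro x hx y hy
      rw [hcoe] at hx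
      exact hor x hx y hy
    · have h1 : ((heapPush imm e).erase mu).length = imm.length := by
        rw [List.length_erase_of_mem hspec.1]
        simp [heapPush]
      have h2 : ((heapPush imm e).length : Int) = (imm.length : Int) + 1 := by
        simp [heapPush]
      rw [h1]
      rw [h2] at hpop
      omega
  · -- under capacity: keep everything
    have h2 : ((heapPush imm e).length : Int) = (imm.length : Int) + 1 := by
      simp [heapPush]
    have hout0 : out = 0 := by
      refine Multiset.card_eq_zero.mp ?_
      rw [h2] at hpop
      omega
    subst hout0
    have hS : (↑(heapPush imm e) : Multiset Int).sum = (↑imm : Multiset Int).sum + e := by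
      rw [hco, Multiset.sum_cons]; ring
    refine ⟨heapPush imm e, 0, ?_, ?_, ?_, ?_⟩
    · simp only [solutionAltGo]
      rw [if_neg hpop]
      rw [hS]
    · rw [hco]
      simp only [add_zero, Multiset.cons_zero]
      rw [add_comm, Multiset.singleton_add]
    · intro x hx y hy
      simp at hy
    · rw [h2]
      rw [h2] at hpop
      simp only [Multiset.card_zero]
      omega

-- the main loop invariant: A's lazy-refund state and B's capped-heap state agree
theorem go_eq : ∀ (rest : List Int) (n0 k0 nA total immSum ans : Int)
    (h imm : List Int) (R out : Multiset Int),
    (∀ e ∈ rest, 0 ≤ e) →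
    (∀ x ∈ R + negM h, (0:Int) ≤ x) →
    nA = n0 - (R + negM h).sum + R.sum →
    0 < nA →
    (R.card : Int) ≤ max k0 0 →
    (∀ r ∈ R, nA ≤ r) →
    (∀ r ∈ R, ∀ x ∈ negM h, x ≤ r) →
    total = (R + negM h).sum →
    (↑imm : Multiset Int) + out = R + negM h →
    immSum = (↑imm : Multiset Int).sum →
    ((imm.length : Int) = min (max k0 0) ((R + negM h).card : Int)) →
    (∀ x ∈ (↑imm : Multiset Int), ∀ y ∈ out, y ≤ x) →
    solutionGo nA (k0 - R.card) h ans rest = solutionAltGo n0 k0 total imm immSum ans rest := by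
  intro rest
  induction rest with
  | nil =>
    intro n0 k0 nA total immSum ans h imm R out _ _ _ _ _ _ _ _ _ _ _ _
    rfl
  | cons e rest' IH =>
    intro n0 k0 nA total immSum ans h imm R out hre hnn hnA hpos hRc hRn hRH htot hsplit hiS hlen hord
    subst hiS htot
    have he0 : 0 ≤ e := hre e (by simp)
    have hre' : ∀ x ∈ rest', 0 ≤ x := fun x hx => hre x (by simp [hx])
    have hc : imm.length + out.card = (R + negM h).card := by
      have h1 := congrArg Multiset.card hsplit
      simpa [Multiset.card_add] using h1
    have hcInt : (((R + negM h).card : ℕ) : Int) = (imm.length : Int) + out.card := by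
      exact_mod_cast hc.symm
    have hlen2 : (imm.length : Int) = min (max k0 0) ((imm.length : Int) + out.card) := by
      have h1 := hlen
      rw [hcInt] at h1
      exact h1
    obtain ⟨imm', out', hunf, hsplit', hord', hlen'⟩ :=
      altGo_step n0 k0 ((R + negM h).sum) ans e rest' imm out hord hlen2
    rw [hunf]
    have hpreS : (↑imm' : Multiset Int) + out' = e ::ₘ (R + negM h) := by
      rw [hsplit', Multiset.add_cons, hsplit]
    have hnn' : ∀ x ∈ e ::ₘ (R + negM h), (0:Int) ≤ x := by
      intro x hx
      rcases Multiset.mem_cons.mp hx with rfl | hx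
      · exact he0
      · exact hnn x hx
    have himmnn : ∀ x ∈ (↑imm' : Multiset Int), (0:Int) ≤ x := by
      intro x hx
      exact hnn' x (hpreS ▸ Multiset.mem_add.mpr (Or.inl hx))
    have hcard_imm' : (imm'.length : Int) = min (max k0 0) (((R + negM h).card : Int) + 1) := by
      rw [hlen']
      congr 1
      push_cast [← hc]
      ring
    have hRle : R ≤ R + negM h := Multiset.le_add_right R (negM h)
    have hRcard_le : (R.card : Int) ≤ ((R + negM h).card : Int) := by
      exact_mod_cast Multiset.card_le_card hRle
    simp only [solutionGo]
    by_cases hA1 : nA - e > 0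
    · -- A pays and survives; B survives too
      rw [if_pos hA1]
      have hRcard : R.card ≤ Multiset.card (↑imm' : Multiset Int) := by
        rw [Multiset.coe_card]
        have : (R.card : Int) ≤ (imm'.length : Int) := by
          rw [hcard_imm']
          omega
        exact_mod_cast this
      have hRsum_le : R.sum ≤ (↑imm' : Multiset Int).sum := by
        refine exch_le ?_ hord' hRcard himmnn
        rw [hpreS]
        exact le_trans hRle (Multiset.le_cons_self _ e)
      have hcond : (R + negM h).sum + e - (↑imm' : Multiset Int).sum < n0 := by
        linarith
      rw [if_pos hcond]
      have hnegM' : negM (heapPush h (-1 * e)) = e ::ₘ negM h := negM_push h e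
      have hpre' : R + negM (heapPush h (-1 * e)) = e ::ₘ (R + negM h) := by
        rw [hnegM', Multiset.add_cons]
      refine IH n0 k0 (nA - e) _ _ (ans + 1) (heapPush h (-1 * e)) imm' R out'
        hre' ?_ ?_ (by omega) hRc ?_ ?_ ?_ ?_ rfl ?_ hord'
      · rw [hpre']; exact hnn'
      · rw [hpre', Multiset.sum_cons]; linarith
      · intro r hr
        have := hRn r hr
        linarith
      · intro r hr x hx
        rw [hnegM'] at hx
        rcases Multiset.mem_cons.mp hx with rfl | hx
        · have := hRn r hr; linarith
        · exact hRH r hr x hx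
      · rw [hpre', Multiset.sum_cons]; ring
      · rw [hpre']; exact hpreS
      · rw [hpre', Multiset.card_cons, hcard_imm']
        push_cast <;> omega
    · rw [if_neg hA1]
      have heA : nA ≤ e := by omega
      by_cases hA2 : k0 - (R.card : Int) > 0
      · -- A spends an immunity on the largest enemy so far; B survives too
        rw [if_pos hA2]
        obtain ⟨muA, hmuA⟩ : ∃ m, (heapPush h (-1 * e)).min? = some m := by
          cases hm : (heapPush h (-1 * e)).min? with
          | none =>
            have : heapPush h (-1 * e) = [] := List.min?_eq_none_iff.mp hm
            simp [heapPush] at this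
          | some m => exact ⟨m, rfl⟩
        have hspecA : muA ∈ heapPush h (-1 * e) ∧ ∀ b ∈ heapPush h (-1 * e), muA ≤ b := by
          rw [List.min?_eq_some_iff] at hmuA; exact hmuA
        simp only [heapPop, hmuA]
        have hnegM1 : negM (heapPush h (-1 * e)) = e ::ₘ negM h := negM_push h e
        have hpmem : -muA ∈ e ::ₘ negM h := by
          rw [← hnegM1]
          exact mem_negM.mpr (by simpa using hspecA.1)
        have hpmax : ∀ x ∈ e ::ₘ negM h, x ≤ -muA := by
          intro x hx
          rw [← hnegM1] at hx
          have := hspecA.2 (-x) (mem_negM.mp hx)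
          omega
        have hpe : e ≤ -muA := hpmax e (Multiset.mem_cons_self e _)
        have hexch : (-muA ::ₘ R).sum ≤ (↑imm' : Multiset Int).sum := by
          refine exch_le ?_ hord' ?_ himmnn
          · rw [hpreS]
            calc (-muA ::ₘ R : Multiset Int) = R + {-muA} := by
                  rw [add_comm, Multiset.singleton_add]
            _ ≤ R + (e ::ₘ negM h) := Multiset.add_le_add_left (Multiset.singleton_le.mpr hpmem)
            _ = e ::ₘ (R + negM h) := Multiset.add_cons e R (negM h)
          · rw [Multiset.card_cons, Multiset.coe_card]
            have : ((R.card + 1 : ℕ) : Int) ≤ (imm'.length : Int) := by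
              rw [hcard_imm']
              push_cast
              omega
            exact_mod_cast this
        have hcond : (R + negM h).sum + e - (↑imm' : Multiset Int).sum < n0 := by
          rw [Multiset.sum_cons] at hexch
          linarith
        rw [if_pos hcond]
        have hnegM2 : negM ((heapPush h (-1 * e)).erase muA) = (e ::ₘ negM h).erase (-muA) := by
          rw [negM_erase, hnegM1]
        have hpre2 : (-muA ::ₘ R) + negM ((heapPush h (-1 * e)).erase muA)
            = e ::ₘ (R + negM h) := by
          rw [hnegM2, Multiset.cons_add, ← Multiset.add_cons,
            Multiset.cons_erase hpmem, Multiset.add_cons]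
        have hkarg : k0 - (R.card : Int) - 1 = k0 - (((-muA ::ₘ R).card : ℕ) : Int) := by
          rw [Multiset.card_cons]
          push_cast
          ring
        rw [hkarg]
        refine IH n0 k0 (nA - e + -1 * muA) _ _ (ans + 1)
          ((heapPush h (-1 * e)).erase muA) imm' (-muA ::ₘ R) out'
          hre' ?_ ?_ ?_ ?_ ?_ ?_ ?_ ?_ rfl ?_ hord'
        · rw [hpre2]; exact hnn'
        · rw [hpre2, Multiset.sum_cons, Multiset.sum_cons]
          linarith
        · linarith
        · rw [Multiset.card_cons]
          push_cast
          omega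
        · intro r hr
          rcases Multiset.mem_cons.mp hr with rfl | hr
          · linarith
          · have h1 := hRn r hr
            rcases Multiset.mem_cons.mp hpmem with hpE | hpH
            · linarith [hpE]
            · have := hRH r hr _ hpH
              linarith
        · intro r hr x hx
          rw [hnegM2] at hx
          have hx' : x ∈ e ::ₘ negM h :=
            Multiset.mem_of_le (Multiset.erase_le _ _) hx
          rcases Multiset.mem_cons.mp hr with rfl | hr
          · exact hpmax x hx'
          · rcases Multiset.mem_cons.mp hx' with rfl | hxH
            · -- x = e survived the erase of the maximum
              by_cases heH : x ∈ negM h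
              · exact hRH r hr x heH
              · have hne : -muA ≠ x := by
                  intro hh
                  rw [hh, Multiset.erase_cons_head] at hx
                  exact heH hx
                have hpH : -muA ∈ negM h := by
                  rcases Multiset.mem_cons.mp hpmem with h1 | h1
                  · exact absurd h1 hne
                  · exact h1
                exact le_trans (hpmax x (Multiset.mem_cons_self x _)) (hRH r hr _ hpH)
            · exact hRH r hr x hxH
        · rw [hpre2, Multiset.sum_cons]; ring
        · rw [hpre2]; exact hpreS
        · rw [hpre2, Multiset.card_cons, hcard_imm']
          push_cast <;> omega
      · -- A is out of immunities and breaks; B's cost has caught up, it breaks too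
        rw [if_neg hA2]
        by_cases hR0 : R = 0
        · have hk0 : max k0 0 = 0 := by
            rw [hR0] at hA2
            simp at hA2
            omega
          have himm'nil : (↑imm' : Multiset Int).sum = 0 := by
            have h1 : imm'.length = 0 := by
              have := hcard_imm'
              rw [hk0] at this
              omega
            rw [List.eq_nil_iff_length_eq_zero.mpr h1]
            rfl
          have hRs : R.sum = 0 := by rw [hR0]; simp
          have hcond : ¬ ((R + negM h).sum + e - (↑imm' : Multiset Int).sum < n0) := by
            intro hcon
            rw [himm'nil] at hcon
            linarith
          rw [if_neg hcond]
        · have hRcard1 : 0 < R.card := Multiset.card_pos.mpr hR0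
          have hcardeq : Multiset.card (↑imm' : Multiset Int) = R.card := by
            rw [Multiset.coe_card]
            have : (imm'.length : Int) = (R.card : Int) := by
              rw [hcard_imm']
              omega
            exact_mod_cast this
          have hbound : (↑imm' : Multiset Int).sum ≤ R.sum + e - nA := by
            refine lemB (H := negM h) ?_ hcardeq ?_ hRn heA
            · have h1 : (↑imm' : Multiset Int) ≤ (↑imm' : Multiset Int) + out' :=
                Multiset.le_add_right _ _
              rw [hpreS, ← Multiset.cons_add] at h1
              exact h1
            · intro y hy r hr
              exact hRH r hr y hy
          have hcond : ¬ ((R + negM h).sum + e - (↑imm' : Multiset Int).sum < n0) := by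
            intro hcon
            linarith
          rw [if_neg hcond]

-- with k ≤ 0 neither program ever uses the heap: A pays while HP stays positive, B's
-- capped heap is always emptied again, so its cost is the bare prefix sum
theorem go_eq_nonpos : ∀ (rest : List Int) (n0 k0 total ans : Int) (h : List Int),
    k0 ≤ 0 →
    solutionGo (n0 - total) k0 h ans rest = solutionAltGo n0 k0 total [] 0 ans rest := by
  intro rest
  induction rest with
  | nil => intros; rfl
  | cons e rest' IH =>
    intro n0 k0 total ans h hk
    have hpop : heapPop (heapPush [] e) = some (e, []) := by
      simp [heapPop, heapPush]
    simp only [solutionGo, solutionAltGo]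
    rw [if_pos (by simp [heapPush]; omega : ((heapPush ([]:List Int) e).length : Int) > k0)]
    simp only [hpop]
    by_cases hc : n0 - total - e > 0
    · rw [if_pos hc, if_pos (by omega : total + e - (0 + e - e) < n0)]
      have h2 : n0 - total - e = n0 - (total + e) := by ring
      have h3 : (0 : Int) + e - e = 0 := by ring
      rw [h2, h3]
      exact IH n0 k0 (total + e) (ans + 1) (heapPush h (-1 * e)) hk
    · rw [if_neg hc, if_neg (by omega : ¬ (total + e - (0 + e - e) < n0)),
        if_neg (by omega : ¬ (k0 > 0))]

-- with an immunity left for every remaining wave, A survives them all: a shortfall is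
-- always refunded by the popped maximum, which is at least the current enemy
theorem go_all : ∀ (rest : List Int) (n k : Int) (h : List Int) (ans : Int),
    0 < n → (rest.length : Int) ≤ k →
    solutionGo n k h ans rest = ans + rest.length := by
  intro rest
  induction rest with
  | nil => intros; simp [solutionGo]
  | cons e rest' IH =>
    intro n k h ans hn hk
    simp only [List.length_cons] at hk
    push_cast at hk
    simp only [solutionGo]
    by_cases hA1 : n - e > 0
    · rw [if_pos hA1]
      rw [IH (n - e) k _ (ans + 1) (by omega) (by omega)]
      simp only [List.length_cons]
      push_cast
      ring
    · rw [if_neg hA1, if_pos (by omega : k > 0)]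
      obtain ⟨muA, hmuA⟩ : ∃ m, (heapPush h (-1 * e)).min? = some m := by
        cases hm : (heapPush h (-1 * e)).min? with
        | none =>
          have : heapPush h (-1 * e) = [] := List.min?_eq_none_iff.mp hm
          simp [heapPush] at this
        | some m => exact ⟨m, rfl⟩
      have hle : muA ≤ -1 * e :=
        (List.min?_eq_some_iff.mp hmuA).2 (-1 * e) (by simp [heapPush])
      simp only [heapPop, hmuA]
      rw [IH (n - e + -1 * muA) (k - 1) _ (ans + 1) (by omega) (by omega)]
      simp only [List.length_cons]
      push_cast
      ring

-- with an immunity for every wave B's heap never reaches its cap, so its cost never grows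
theorem altGo_all : ∀ (rest : List Int) (n0 k0 total : Int) (imm : List Int)
    (immSum ans : Int),
    total - immSum < n0 → ((imm.length : Int) + rest.length ≤ k0) →
    solutionAltGo n0 k0 total imm immSum ans rest = ans + rest.length := by
  intro rest
  induction rest with
  | nil => intros; simp [solutionAltGo]
  | cons e rest' IH =>
    intro n0 k0 total imm immSum ans hcost hk
    simp only [List.length_cons] at hk
    push_cast at hk
    simp only [solutionAltGo]
    rw [if_neg (by simp [heapPush]; omega : ¬ (((heapPush imm e).length : Int) > k0))]
    rw [if_pos (by omega : total + e - (immSum + e) < n0)]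
    rw [IH n0 k0 (total + e) (heapPush imm e) (immSum + e) (ans + 1)
      (by omega) (by simp [heapPush]; push_cast; omega)]
    simp only [List.length_cons]
    push_cast
    ring

-- ===== VERDICT (by name: the statement is the Claim_ definition above) =====
theorem solution_spec : Claim_equal_solution := by
  unfold Claim_equal_solution
  intro n k enemy _ hpre
  unfold Spec_solution solution solution_alt
  rcases hpre with ⟨hn, henn⟩ | hk | ⟨hn, hlen⟩
  · have := go_eq enemy n k n 0 0 0 [] [] 0 0
      henn
      (by intro x hx; simp [negM_nil] at hx)
      (by simp [negM_nil])
      hn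
      (by simp <;> omega)
      (by intro r hr; simp at hr)
      (by intro r hr; simp at hr)
      (by simp [negM_nil])
      (by simp [negM_nil])
      (by simp)
      (by simp [negM_nil] <;> omega)
      (by intro x hx; simp at hx)
    simpa using this
  · have := go_eq_nonpos enemy n k 0 0 [] hk
    simpa using this
  · rw [go_all enemy n k [] 0 hn hlen,
      altGo_all enemy n k 0 [] 0 0 (by omega) (by simpa using hlen)]
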